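-- pv_equiv track=rewrite | github.com/Centrattic/pivotal-research | CIS-probes/src/analysis.py | make_country_mapping
-- ===== SOURCE A (Python) =====
-- def normalize(name):
--     return name.strip().lower()
--
-- def make_country_mapping(countries_list, csv_countries):
--     mapping = {}
--     csv_norm_to_orig = {normalize(name): name for name in csv_countries}
--     for c in countries_list:
--         norm = normalize(c)
--         if norm in csv_norm_to_orig:
--             mapping[c] = csv_norm_to_orig[norm]
--         else:
--             mapping[c] = None
--     return mapping
-- ===== SOURCE B (Python) =====
-- def normalize(name):
--     return name.strip().lower()
--
-- def make_country_mapping(countries_list, csv_countries):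
--     mapping = {}
--     for c in countries_list:
--         norm = normalize(c)
--         found = None
--         for name in csv_countries:
--             if normalize(name) == norm:
--                 found = name
--         mapping[c] = found
--     return mapping
-- ===== Notes on version B (the rewrite author's own statement) =====
-- stated objective: simpler
-- what changed: Drops the precomputed normalized->original dict: for each country B does a direct linear scan of csv_countries, keeping the last normalized match (None if none).
import Mathlib
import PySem

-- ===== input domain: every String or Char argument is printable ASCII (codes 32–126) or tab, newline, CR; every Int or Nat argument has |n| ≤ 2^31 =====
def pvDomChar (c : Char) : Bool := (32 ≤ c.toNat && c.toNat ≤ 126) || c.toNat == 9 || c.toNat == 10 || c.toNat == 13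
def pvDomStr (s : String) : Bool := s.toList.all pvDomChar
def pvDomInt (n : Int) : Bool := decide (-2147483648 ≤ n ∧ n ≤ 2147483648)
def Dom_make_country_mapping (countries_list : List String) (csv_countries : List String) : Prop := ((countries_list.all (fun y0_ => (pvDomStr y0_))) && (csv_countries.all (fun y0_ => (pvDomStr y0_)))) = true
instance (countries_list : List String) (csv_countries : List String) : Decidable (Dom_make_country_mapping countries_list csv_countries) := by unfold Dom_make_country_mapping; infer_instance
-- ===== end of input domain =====

-- B replaces A's precomputed normalized->original dict by a direct linear scan of
-- csv_countries per country (last normalized match wins); objective: simpler.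

-- ===== PORT A =====
def pvNormalize (name : String) : String := PySem.Str.lower (PySem.Str.strip name)

def make_country_mapping (countries_list : List String) (csv_countries : List String) : List (String × Option String) :=
  let csv_norm_to_orig : PySem.Dict String String :=
    csv_countries.foldl (fun d name => d.insert (pvNormalize name) name) PySem.Dict.empty
  let mapping : PySem.Dict String (Option String) :=
    countries_list.foldl (fun m c =>
      let norm := pvNormalize c
      if csv_norm_to_orig.contains norm then
        m.insert c (csv_norm_to_orig.get? norm)
      else
        m.insert c none) PySem.Dict.empty
  mapping.items

-- ===== PORT B =====
def pvNormalizeB (name : String) : String := PySem.Str.lower (PySem.Str.strip name)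

def make_country_mapping_alt (countries_list : List String) (csv_countries : List String) : List (String × Option String) :=
  let mapping : PySem.Dict String (Option String) :=
    countries_list.foldl (fun m c =>
      let norm := pvNormalizeB c
      let found : Option String :=
        csv_countries.foldl (fun found name =>
          if pvNormalizeB name == norm then some name else found) none
      m.insert c found) PySem.Dict.empty
  mapping.items

-- ===== PRECONDITION & SPEC =====
def Spec_make_country_mapping (countries_list : List String) (csv_countries : List String) (out : List (String × Option String)) : Prop := out = make_country_mapping_alt countries_list csv_countries
instance (countries_list : List String) (csv_countries : List String) (out : List (String × Option String)) : Decidable (Spec_make_country_mapping countries_list csv_countries out) := by unfold Spec_make_country_mapping; infer_instance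

-- ===== CLAIM (what is proved, stated in full; the proofs are below) =====
def Claim_equal_make_country_mapping : Prop := ∀ (countries_list : List String) (csv_countries : List String), Dom_make_country_mapping countries_list csv_countries → Spec_make_country_mapping countries_list csv_countries (make_country_mapping countries_list csv_countries)

-- ===== LEMMAS AND PROOFS =====

-- looking up k in the dict built by A's comprehension = B's last-match scan of csv_countries
theorem pv_get_dict_eq_scan (csv : List String) (d : PySem.Dict String String) (k : String) :
    (csv.foldl (fun d name => d.insert (pvNormalize name) name) d).get? k
      = csv.foldl (fun found name => if pvNormalize name == k then some name else found) (d.get? k) := by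
  induction csv generalizing d with
  | nil => rfl
  | cons n rest ih =>
    have hinit : (d.insert (pvNormalize n) n).get? k
        = if pvNormalize n == k then some n else d.get? k := by
      rw [PySem.Dict.get?_insert]
      by_cases h : k = pvNormalize n
      · simp [h]
      · rw [if_neg h, if_neg]
        intro hb
        exact h (beq_iff_eq.mp hb).symm
    rw [List.foldl_cons, List.foldl_cons, ih, hinit]

theorem make_country_mapping_eq (countries_list csv_countries : List String) :
    make_country_mapping countries_list csv_countries
      = make_country_mapping_alt countries_list csv_countries := by
  simp only [make_country_mapping, make_country_mapping_alt]
  have hstep : (fun (m : PySem.Dict String (Option String)) (c : String) =>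
      let norm := pvNormalize c
      if (csv_countries.foldl (fun d name => d.insert (pvNormalize name) name) PySem.Dict.empty).contains norm then
        m.insert c ((csv_countries.foldl (fun d name => d.insert (pvNormalize name) name) PySem.Dict.empty).get? norm)
      else
        m.insert c none)
    = (fun (m : PySem.Dict String (Option String)) (c : String) =>
      let norm := pvNormalizeB c
      let found : Option String :=
        csv_countries.foldl (fun found name =>
          if pvNormalizeB name == norm then some name else found) none
      m.insert c found) := by
    funext m c
    show (if (csv_countries.foldl (fun d name => d.insert (pvNormalize name) name) PySem.Dict.empty).contains (pvNormalize c) then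
        m.insert c ((csv_countries.foldl (fun d name => d.insert (pvNormalize name) name) PySem.Dict.empty).get? (pvNormalize c))
      else m.insert c none)
      = m.insert c (csv_countries.foldl (fun found name =>
          if pvNormalizeB name == pvNormalizeB c then some name else found) none)
    have hget : (csv_countries.foldl (fun d name => d.insert (pvNormalize name) name) PySem.Dict.empty).get? (pvNormalize c)
        = csv_countries.foldl (fun found name =>
            if pvNormalizeB name == pvNormalizeB c then some name else found) none := by
      rw [pv_get_dict_eq_scan]; rfl
    by_cases h : (csv_countries.foldl (fun d name => d.insert (pvNormalize name) name) PySem.Dict.empty).contains (pvNormalize c) = true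
    · rw [if_pos h, hget]
    · have hnone : (csv_countries.foldl (fun d name => d.insert (pvNormalize name) name) PySem.Dict.empty).get? (pvNormalize c) = none := by
        have hc := PySem.Dict.contains_eq_isSome_get? (csv_countries.foldl (fun d name => d.insert (pvNormalize name) name) PySem.Dict.empty) (pvNormalize c)
        exact Option.not_isSome_iff_eq_none.mp (by rw [← hc]; simpa using h)
      rw [if_neg h, ← hget, hnone]
  rw [hstep]

-- ===== VERDICT (by name: the statement is the Claim_ definition above) =====
theorem make_country_mapping_spec : Claim_equal_make_country_mapping := by
  intro cl csv _
  unfold Spec_make_country_mapping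
  exact make_country_mapping_eq cl csv
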